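-- pv_equiv track=rewrite | github.com/GregoryMorse/dyngraph | algsort.py | presortedness
-- ===== SOURCE A (Python) =====
-- def presortedness(l):
--     direction, cursubseq, lastitem = None, 1, l[0]
--     inversion, ascendingruns, longestsubseq = 0, 0, 0
--     for item in l[1:]:
--         newdirection = item < lastitem
--         if direction is None: direction = newdirection
--         if newdirection != direction:
--             inversion += 1
--             cursubseq = 2 if not newdirection else 1
--         if newdirection and not direction: ascendingruns += 1
--         if not newdirection and not direction: cursubseq += 1
--         lastitem, direction = item, newdirection
--         longestsubseq = max(longestsubseq, cursubseq)
--     if direction == False: ascendingruns += 1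
--     return inversion, ascendingruns, longestsubseq
-- ===== SOURCE B (Python) =====
-- def presortedness(l):
--     _ = l[0]  # empty input raises IndexError, as in the original
--     dirs = [b < a for a, b in zip(l, l[1:])]
--     inversion = sum(1 for x, y in zip(dirs, dirs[1:]) if x != y)
--     runs, longest_run, cur = 0, 0, 0
--     for d in dirs:
--         if d:
--             cur = 0
--         else:
--             if cur == 0:
--                 runs += 1
--             cur += 1
--             if cur > longest_run:
--                 longest_run = cur
--     longestsubseq = longest_run + 1 if dirs else 0
--     return inversion, runs, longestsubseq
-- ===== Notes on version B (the rewrite author's own statement) =====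
-- stated objective: alternative
-- what changed: B first materialises the list of pairwise comparisons (dirs) and then derives the three metrics from it: inversions as adjacent-change count over dirs, ascending runs as the number of maximal False runs, and the longest ascending subsequence as the longest False run plus one, replacing A's single intertwined stateful loop with seeded direction and cursubseq resets.
import Mathlib
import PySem

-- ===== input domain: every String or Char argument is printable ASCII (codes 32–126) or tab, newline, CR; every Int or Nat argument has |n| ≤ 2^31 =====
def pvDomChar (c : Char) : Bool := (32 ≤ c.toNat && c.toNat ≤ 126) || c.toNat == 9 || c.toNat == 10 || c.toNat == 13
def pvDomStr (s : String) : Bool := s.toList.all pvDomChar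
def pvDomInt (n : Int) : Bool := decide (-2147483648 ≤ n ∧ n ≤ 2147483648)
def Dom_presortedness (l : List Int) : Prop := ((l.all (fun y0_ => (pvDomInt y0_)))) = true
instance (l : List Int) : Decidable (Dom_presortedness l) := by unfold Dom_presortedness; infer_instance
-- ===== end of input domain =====

-- B derives the three metrics from the precomputed comparison list instead of A's intertwined stateful loop; same O(n) cost.

-- ===== PORT A =====
-- A's loop over l[1:] with state (direction : Option Bool, cursubseq, lastitem, inversion, ascendingruns, longestsubseq)
def presortALoop (direction : Option Bool) (cursubseq lastitem inversion ascendingruns longestsubseq : Int) :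
    List Int → Int × Int × Int
  | [] => (inversion, (if direction = some false then ascendingruns + 1 else ascendingruns), longestsubseq)
  | item :: rest =>
      let newdirection : Bool := item < lastitem
      let dir : Bool := match direction with | none => newdirection | some d => d
      let inversion' := if newdirection ≠ dir then inversion + 1 else inversion
      let cursubseq' := if newdirection ≠ dir then (if ¬newdirection then 2 else 1) else cursubseq
      let ascendingruns' := if newdirection ∧ ¬dir then ascendingruns + 1 else ascendingruns
      let cursubseq'' := if ¬newdirection ∧ ¬dir then cursubseq' + 1 else cursubseq'
      let longestsubseq' := max longestsubseq cursubseq''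
      presortALoop (some newdirection) cursubseq'' item inversion' ascendingruns' longestsubseq' rest

def presortedness (l : List Int) : Int × Int × Int :=
  match l with
  | [] => (0, 0, 0)   -- Python raises IndexError here; excluded by Pre_
  | x :: rest => presortALoop none 1 x 0 0 0 rest

-- ===== PORT B =====
-- dirs = [b < a for a, b in zip(l, l[1:])]
def dirsB (l : List Int) : List Bool :=
  (l.zip l.tail).map (fun p => p.2 < p.1)

-- sum(1 for x, y in zip(dirs, dirs[1:]) if x != y)
def invB (ds : List Bool) : Int :=
  ((ds.zip ds.tail).filter (fun p => p.1 ≠ p.2)).length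

-- the runs/longest_run/cur loop over dirs
def runsLoop (runs longestRun cur : Int) : List Bool → Int × Int
  | [] => (runs, longestRun)
  | d :: rest =>
      if d then runsLoop runs longestRun 0 rest
      else
        let runs' := if cur = 0 then runs + 1 else runs
        let cur' := cur + 1
        let longestRun' := if cur' > longestRun then cur' else longestRun
        runsLoop runs' longestRun' cur' rest

def presortedness_alt (l : List Int) : Int × Int × Int :=
  match l with
  | [] => (0, 0, 0)   -- l[0] raises IndexError here, as in A; excluded by Pre_
  | _ :: _ =>
      let dirs := dirsB l
      let inversion := invB dirs
      let rl := runsLoop 0 0 0 dirs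
      let longestsubseq : Int := if dirs = [] then 0 else rl.2 + 1
      (inversion, rl.1, longestsubseq)

-- ===== PRECONDITION & SPEC =====
-- A raises IndexError (l[0]) on the empty list; Pre_ excludes exactly that input.
def Pre_presortedness (l : List Int) : Prop := l ≠ []
instance (l : List Int) : Decidable (Pre_presortedness l) := by unfold Pre_presortedness; infer_instance
def pvWitness_presortedness : List Int := [3, 1, 2]

def Spec_presortedness (l : List Int) (out : Int × Int × Int) : Prop := out = presortedness_alt l
instance (l : List Int) (out : Int × Int × Int) : Decidable (Spec_presortedness l out) := by unfold Spec_presortedness; infer_instance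

-- ===== CLAIM (what is proved, stated in full; the proofs are below) =====
def Claim_equal_presortedness : Prop := ∀ (l : List Int), Dom_presortedness l → Pre_presortedness l → Spec_presortedness l (presortedness l)

-- ===== LEMMAS AND PROOFS =====

-- comparison list by direct recursion (proof-side view of dirsB)
def dirsOf (last : Int) : List Int → List Bool
  | [] => []
  | x :: rest => (decide (x < last)) :: dirsOf x rest

lemma zipWith_dirsOf (rest : List Int) :
    ∀ (x : Int), List.zipWith (fun a b => decide (b < a)) (x :: rest) rest = dirsOf x rest := by
  induction rest with
  | nil => intro x; simp [dirsOf]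
  | cons y ys ih => intro x; simp [dirsOf, ih y]

lemma dirsB_cons (x : Int) (rest : List Int) : dirsB (x :: rest) = dirsOf x rest := by
  simp [dirsB, List.zip, ← zipWith_dirsOf]

-- adjacent-change count seeded with a previous direction (proof-side view of invB)
def chg (p : Bool) : List Bool → Int
  | [] => 0
  | d :: ds => (if d ≠ p then 1 else 0) + chg d ds

lemma invB_cons (ds : List Bool) : ∀ (d : Bool), invB (d :: ds) = chg d ds := by
  induction ds with
  | nil => intro d; simp [invB, chg]
  | cons e es ih =>
      intro d
      have h := ih e
      simp only [invB, List.tail_cons, List.zip, List.zipWith_cons_cons, List.filter_cons] at h ⊢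
      by_cases hde : d = e
      · subst hde
        rw [chg, if_neg (by simp)]
        simpa using h
      · rw [chg, if_pos (fun hh => hde hh.symm)]
        rw [if_pos (by simp [hde])]
        simp only [List.length_cons]
        push_cast
        omega

-- A's item loop equals the same loop driven by the comparison list
def loopA (direction : Option Bool) (cursubseq inversion ascendingruns longestsubseq : Int) :
    List Bool → Int × Int × Int
  | [] => (inversion, (if direction = some false then ascendingruns + 1 else ascendingruns), longestsubseq)
  | nd :: rest =>
      let dir : Bool := match direction with | none => nd | some d => d
      let inversion' := if nd ≠ dir then inversion + 1 else inversion
      let cursubseq' := if nd ≠ dir then (if ¬nd then 2 else 1) else cursubseq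
      let ascendingruns' := if nd ∧ ¬dir then ascendingruns + 1 else ascendingruns
      let cursubseq'' := if ¬nd ∧ ¬dir then cursubseq' + 1 else cursubseq'
      let longestsubseq' := max longestsubseq cursubseq''
      loopA (some nd) cursubseq'' inversion' ascendingruns' longestsubseq' rest

lemma presortALoop_eq_loopA (rest : List Int) :
    ∀ (direction : Option Bool) (cs last inv ar lg : Int),
    presortALoop direction cs last inv ar lg rest = loopA direction cs inv ar lg (dirsOf last rest) := by
  induction rest with
  | nil => intro d cs last inv ar lg; simp [presortALoop, dirsOf, loopA]
  | cons x xs ih =>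
      intro d cs last inv ar lg
      simp only [presortALoop, dirsOf, loopA]
      exact ih _ _ _ _ _ _

-- main invariant: A's seeded loop state vs B's runs loop state
lemma loopA_eq_runs (ds : List Bool) :
    ∀ (prevd : Bool) (inv cur lr rb : Int),
    (if prevd then cur = 0 else 1 ≤ cur) → 0 ≤ lr →
    loopA (some prevd) (if prevd then 1 else cur + 1) inv (rb - (if prevd then 0 else 1)) (lr + 1) ds
      = (inv + chg prevd ds, (runsLoop rb lr cur ds).1, (runsLoop rb lr cur ds).2 + 1) := by
  induction ds with
  | nil =>
      intro prevd inv cur lr rb hcur hlr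
      cases prevd <;> simp [loopA, runsLoop, chg]
  | cons d ds ih =>
      intro prevd inv cur lr rb hcur hlr
      cases prevd with
      | false =>
        simp only [if_neg (Bool.false_ne_true)] at hcur ⊢
        cases d with
        | false =>
          have h := ih false inv (cur + 1) (max lr (cur + 1)) rb (by simp; omega) (by omega)
          simp [loopA, runsLoop, chg, if_neg (by omega : ¬ cur = 0)]
          rw [show (if lr ≤ cur then cur + 1 else lr) = max lr (cur + 1) from by split_ifs <;> omega]
          simpa using h
        | true =>
          have h := ih true (inv + 1) 0 lr rb (by simp) hlr
          simp [loopA, runsLoop, chg]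
          rw [show max (lr + 1) 1 = lr + 1 from by omega]
          simpa [add_assoc] using h
      | true =>
        simp only [] at hcur
        subst hcur
        cases d with
        | false =>
          have h := ih false (inv + 1) 1 (max lr 1) (rb + 1) (by simp) (by omega)
          simp [loopA, runsLoop, chg]
          rw [show (if lr < 1 then 1 else lr) = max lr 1 from by split_ifs <;> omega,
            show max (lr + 1) 2 = max lr 1 + 1 from by omega]
          simpa [add_assoc] using h
        | true =>
          have h := ih true inv 0 lr rb (by simp) hlr
          simp [loopA, runsLoop, chg]
          rw [show max (lr + 1) 1 = lr + 1 from by omega]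
          simpa using h

-- ===== VERDICT (by name: the statement is the Claim_ definition above) =====
theorem presortedness_spec : Claim_equal_presortedness := by
  intro l _ hpre
  unfold Spec_presortedness
  match l with
  | [] => exact absurd rfl hpre
  | [x] => simp [presortedness, presortedness_alt, presortALoop, dirsB, invB, runsLoop]
  | x :: y :: rest =>
      simp only [presortedness, presortedness_alt, dirsB_cons, dirsOf,
        presortALoop_eq_loopA]
      -- unfold one step of loopA (the seeded first iteration)
      simp only [loopA]
      by_cases hd : y < x
      · have h := loopA_eq_runs (dirsOf y rest) true 0 0 0 0 (by simp) (by norm_num)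
        simp only [invB_cons]
        simpa [hd, runsLoop, max_def] using h
      · have h := loopA_eq_runs (dirsOf y rest) false 0 1 1 1 (by simp) (by norm_num)
        simp only [invB_cons]
        simpa [hd, runsLoop, max_def, zero_add, sub_self] using h
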